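-- pv_equiv track=rewrite | github.com/the-omega-institute/automath | theory/2026_golden_ratio_driven_scan_projection_generation_recursive_emergence/scripts/exp_fold_collision_resonance_nullmodes_hankel.py | _normalize_int_vec
-- ===== SOURCE A (Python) =====
-- from math import gcd
-- from typing import Dict, List, Tuple
--
-- def _gcd_list(xs: List[int]) -> int:
--     g = 0
--     for x in xs:
--         g = gcd(g, abs(int(x)))
--     return g
--
-- def _normalize_int_vec(v: List[int]) -> List[int]:
--     if all(x == 0 for x in v):
--         return v
--     g = _gcd_list(v)
--     if g > 1:
--         v = [x // g for x in v]
--     # fix sign: first nonzero positive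
--     for x in v:
--         if x != 0:
--             if x < 0:
--                 v = [-t for t in v]
--             break
--     return v
-- ===== SOURCE B (Python) =====
-- def _normalize_int_vec(v):
--     # find first nonzero element (its sign fixes the output sign)
--     a = 0
--     for x in v:
--         if int(x) != 0:
--             a = int(x)
--             break
--     if a == 0:
--         return v
--     # largest common divisor found by enumerating divisors of |a| up to sqrt(|a|)
--     m = abs(a)
--     best = 1
--     d = 1
--     while d * d <= m:
--         if m % d == 0:
--             for c in (m // d, d):
--                 if c > best and all(int(x) % c == 0 for x in v):
--                     best = c
--         d += 1
--     s = 1 if a > 0 else -1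
--     return [s * (x // best) for x in v]
-- ===== Notes on version B (the rewrite author's own statement) =====
-- stated objective: alternative
-- what changed: B never calls gcd: it finds the first nonzero element a, then determines the normalizing divisor by enumerating the divisors of |a| up to sqrt(|a|) and keeping the largest one dividing every element, and emits the result in one comprehension s*(x//best) with s the sign of a.
import Mathlib
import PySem

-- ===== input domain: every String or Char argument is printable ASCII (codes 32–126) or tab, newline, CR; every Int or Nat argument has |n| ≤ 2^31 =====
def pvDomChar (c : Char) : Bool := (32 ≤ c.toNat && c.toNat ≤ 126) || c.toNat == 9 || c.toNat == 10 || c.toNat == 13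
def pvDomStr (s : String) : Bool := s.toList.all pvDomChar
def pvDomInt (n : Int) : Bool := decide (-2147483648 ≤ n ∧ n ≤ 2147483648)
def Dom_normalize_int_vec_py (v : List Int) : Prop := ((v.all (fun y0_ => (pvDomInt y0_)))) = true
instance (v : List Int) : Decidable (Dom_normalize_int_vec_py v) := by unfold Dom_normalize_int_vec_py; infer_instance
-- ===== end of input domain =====

-- B replaces A's gcd fold + divide + sign-fix passes by a divisor-enumeration algorithm:
-- it finds the first nonzero element a, determines the normalizing divisor as the largest
-- common divisor among the divisors of |a| (enumerated up to sqrt(|a|)), and emits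
-- s * (x // best) in one comprehension.

-- ===== PORT A =====
-- helper: Python's `for x in v: if x != 0: (negate if x < 0); break` sign-fix loop
def pvFixSign (orig : List Int) : List Int → List Int
  | [] => orig
  | x :: rest => if x ≠ 0 then (if x < 0 then orig.map (fun t => -t) else orig) else pvFixSign orig rest

-- _gcd_list: g = 0; for x in xs: g = gcd(g, abs(int(x)))
def gcd_list_py (xs : List Int) : Int :=
  xs.foldl (fun g x => ((Int.gcd g x : Nat) : Int)) 0

def normalize_int_vec_py (v : List Int) : List Int :=
  if v.all (fun x => x == 0) then v
  else
    let g := gcd_list_py v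
    let v1 := if g > 1 then v.map (fun x => PySem.Int.floordiv x g) else v
    pvFixSign v1 v1

-- ===== PORT B =====
-- B's first loop: first nonzero element of v (0 if none)
def pvFirstNonzero : List Int → Int
  | [] => 0
  | x :: r => if x ≠ 0 then x else pvFirstNonzero r

-- body of B's `for c in (m // d, d)` loop: `if c > best and all(x % c == 0): best = c`
def pvTryCand (v : List Int) (best c : Nat) : Nat :=
  if best < c && v.all (fun x => PySem.Int.mod x ((c : Nat) : Int) == 0) then c else best

-- B's while loop: d from 1 while d*d ≤ m, trying candidates m/d and d when d divides m
def pvDivLoop (v : List Int) (m : Nat) (d : Nat) (best : Nat) : Nat :=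
  if h : d * d ≤ m then
    pvDivLoop v m (d + 1)
      (if m % d == 0 then pvTryCand v (pvTryCand v best (m / d)) d else best)
  else best
termination_by m + 1 - d
decreasing_by
  rcases Nat.eq_zero_or_pos d with h0 | h0
  · omega
  · have : d ≤ d * d := Nat.le_mul_of_pos_left d h0
    omega

def normalize_int_vec_py_alt (v : List Int) : List Int :=
  let a := pvFirstNonzero v
  if a == 0 then v
  else
    let m := a.natAbs
    let best := pvDivLoop v m 1 1
    let s : Int := if a > 0 then 1 else -1
    v.map (fun x => s * PySem.Int.floordiv x (best : Int))

-- ===== PRECONDITION & SPEC =====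
def Spec_normalize_int_vec_py (v : List Int) (out : List Int) : Prop := out = normalize_int_vec_py_alt v
instance (v : List Int) (out : List Int) : Decidable (Spec_normalize_int_vec_py v out) := by unfold Spec_normalize_int_vec_py; infer_instance

-- ===== CLAIM (what is proved, stated in full; the proofs are below) =====
def Claim_equal_normalize_int_vec_py : Prop := ∀ (v : List Int), Dom_normalize_int_vec_py v → Spec_normalize_int_vec_py v (normalize_int_vec_py v)

-- ===== LEMMAS AND PROOFS =====

-- sign of the first nonzero element (0 if none)
def pvFirstSign : List Int → Int
  | [] => 0
  | x :: r => if x ≠ 0 then (if x < 0 then -1 else 1) else pvFirstSign r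

-- Nat-valued gcd fold
def pvGn (v : List Int) (n : Nat) : Nat := v.foldl (fun g x => Nat.gcd g x.natAbs) n

theorem pvGn_int (v : List Int) (n : Nat) :
    v.foldl (fun g x => ((Int.gcd g x : Nat) : Int)) (n : Int) = ((pvGn v n : Nat) : Int) := by
  induction v generalizing n with
  | nil => rfl
  | cons x r ih =>
      simp only [List.foldl_cons, pvGn]
      have : Int.gcd (n : Int) x = Nat.gcd n x.natAbs := by simp [Int.gcd]
      rw [this, ih]
      rfl

theorem pvGn_dvd_init (v : List Int) (n : Nat) : pvGn v n ∣ n := by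
  induction v generalizing n with
  | nil => exact dvd_rfl
  | cons x r ih =>
      exact dvd_trans (ih (Nat.gcd n x.natAbs)) (Nat.gcd_dvd_left _ _)

theorem pvGn_dvd_mem (v : List Int) (n : Nat) (x : Int) (hx : x ∈ v) : pvGn v n ∣ x.natAbs := by
  induction v generalizing n with
  | nil => cases hx
  | cons y r ih =>
      rcases List.mem_cons.mp hx with h | h
      · subst h
        exact dvd_trans (pvGn_dvd_init r _) (Nat.gcd_dvd_right _ _)
      · exact ih (Nat.gcd n y.natAbs) h

theorem pvGn_eq_zero (v : List Int) (n : Nat) :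
    pvGn v n = 0 ↔ (n = 0 ∧ ∀ x ∈ v, x = 0) := by
  induction v generalizing n with
  | nil => simp [pvGn]
  | cons x r ih =>
      have := ih (Nat.gcd n x.natAbs)
      simp only [pvGn, List.foldl_cons] at this ⊢
      rw [this, Nat.gcd_eq_zero_iff]
      constructor
      · rintro ⟨⟨h1, h2⟩, h3⟩
        exact ⟨h1, by
          intro y hy
          rcases List.mem_cons.mp hy with h | h
          · subst h; exact Int.natAbs_eq_zero.mp h2
          · exact h3 y h⟩
      · rintro ⟨h1, h2⟩
        refine ⟨⟨h1, Int.natAbs_eq_zero.mpr (h2 x (by simp))⟩, fun y hy => h2 y (by simp [hy])⟩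

theorem pvGn_dvd_of (v : List Int) (n c : Nat) (hn : c ∣ n)
    (hall : ∀ x ∈ v, c ∣ x.natAbs) : c ∣ pvGn v n := by
  induction v generalizing n with
  | nil => exact hn
  | cons x r ih =>
      exact ih (Nat.gcd n x.natAbs)
        (Nat.dvd_gcd hn (hall x (by simp)))
        (fun y hy => hall y (by simp [hy]))

theorem pvFirstNonzero_eq_zero (v : List Int) : pvFirstNonzero v = 0 ↔ ∀ x ∈ v, x = 0 := by
  induction v with
  | nil => simp [pvFirstNonzero]
  | cons x r ih =>
      by_cases hx : x = 0
      · simp [pvFirstNonzero, hx, ih]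
      · simp [pvFirstNonzero, hx]

theorem pvFirstNonzero_mem (v : List Int) (h : pvFirstNonzero v ≠ 0) : pvFirstNonzero v ∈ v := by
  induction v with
  | nil => simp [pvFirstNonzero] at h
  | cons x r ih =>
      by_cases hx : x = 0
      · simp only [pvFirstNonzero, hx] at h ⊢
        simp only [ne_eq, not_true_eq_false, if_false] at h ⊢
        exact List.mem_cons_of_mem _ (ih h)
      · simp [pvFirstNonzero, hx]

theorem pvFirstSign_of_firstNonzero (v : List Int) (h : pvFirstNonzero v ≠ 0) :
    pvFirstSign v = if pvFirstNonzero v < 0 then -1 else 1 := by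
  induction v with
  | nil => simp [pvFirstNonzero] at h
  | cons x r ih =>
      by_cases hx : x = 0
      · simp only [pvFirstNonzero, pvFirstSign, hx] at h ⊢
        simp only [ne_eq, not_true_eq_false, if_false] at h ⊢
        exact ih h
      · simp [pvFirstNonzero, pvFirstSign, hx]

theorem pvFixSign_eq (orig l : List Int) :
    pvFixSign orig l = if pvFirstSign l = -1 then orig.map (fun t => -t) else orig := by
  induction l with
  | nil => simp [pvFixSign, pvFirstSign]
  | cons x r ih =>
      by_cases hx : x = 0
      · simp [pvFixSign, pvFirstSign, hx, ih]
      · by_cases hneg : x < 0 <;> simp [pvFixSign, pvFirstSign, hx, hneg]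

theorem pvFirstSign_map (v : List Int) (f : Int → Int)
    (h : ∀ x ∈ v, (f x = 0 ↔ x = 0) ∧ (f x < 0 ↔ x < 0)) :
    pvFirstSign (v.map f) = pvFirstSign v := by
  induction v with
  | nil => rfl
  | cons x r ih =>
      have hx := h x (by simp)
      by_cases h0 : x = 0
      · have hfx : f x = 0 := hx.1.mpr h0
        subst h0
        simp [pvFirstSign, hfx, ih (fun y hy => h y (by simp [hy]))]
      · have hf0 : ¬ f x = 0 := fun hc => h0 (hx.1.mp hc)
        by_cases hneg : x < 0
        · have : f x < 0 := hx.2.mpr hneg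
          simp [pvFirstSign, h0, hf0, hneg, this]
        · have : ¬ f x < 0 := fun hc => hneg (hx.2.mp hc)
          simp [pvFirstSign, h0, hf0, hneg, this]

-- pointwise behaviour of x // G for a positive G dividing x
theorem pvFdiv_props (G x : Int) (hG : 0 < G) (hdvd : G ∣ x) :
    (PySem.Int.floordiv x G = 0 ↔ x = 0) ∧ (PySem.Int.floordiv x G < 0 ↔ x < 0)
      ∧ PySem.Int.floordiv x G * G = x := by
  obtain ⟨k, hk⟩ := hdvd
  have hGne : G ≠ 0 := ne_of_gt hG
  have hfd : PySem.Int.floordiv x G = k := by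
    rw [PySem.Int.floordiv_eq_ediv_of_pos hG, hk, Int.mul_ediv_cancel_left _ hGne]
  refine ⟨?_, ?_, ?_⟩
  · rw [hfd, hk]
    constructor
    · intro h; simp [h]
    · intro h
      rcases mul_eq_zero.mp h with h | h
      · exact absurd h hGne
      · exact h
  · rw [hfd, hk]
    constructor
    · intro h; exact mul_neg_of_pos_of_neg hG h
    · intro h
      rcases lt_trichotomy k 0 with h' | h' | h'
      · exact h'
      · subst h'; simp at h
      · exact absurd (mul_pos hG h') (by omega)
  · rw [hfd, hk]; ring

-- the Bool all-check of B means "c divides every element"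
theorem pvAllMod_iff (v : List Int) (c : Nat) :
    (v.all (fun x => PySem.Int.mod x ((c : Nat) : Int) == 0) = true) ↔ ∀ x ∈ v, ((c : Nat) : Int) ∣ x := by
  simp only [List.all_eq_true, beq_iff_eq]
  constructor
  · intro h x hx; exact (PySem.Int.mod_eq_zero_iff_dvd x _).mp (h x hx)
  · intro h x hx; exact (PySem.Int.mod_eq_zero_iff_dvd x _).mpr (h x hx)

theorem pvTryCand_mono (v : List Int) (best c : Nat) : best ≤ pvTryCand v best c := by
  unfold pvTryCand
  split_ifs with h
  · rw [Bool.and_eq_true, decide_eq_true_eq] at h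
    omega
  · exact le_rfl

theorem pvTryCand_le (v : List Int) (best c G : Nat) (hbG : best ≤ G) (hG1 : 1 ≤ G)
    (hmax : ∀ c' : Nat, (∀ x ∈ v, ((c' : Nat) : Int) ∣ x) → c' ∣ G) :
    pvTryCand v best c ≤ G := by
  unfold pvTryCand
  split_ifs with h
  · rw [Bool.and_eq_true] at h
    exact Nat.le_of_dvd hG1 (hmax c ((pvAllMod_iff v c).mp h.2))
  · exact hbG

theorem pvTryCand_hit (v : List Int) (best c : Nat)
    (hcd : ∀ x ∈ v, ((c : Nat) : Int) ∣ x) : c ≤ pvTryCand v best c := by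
  have hb := (pvAllMod_iff v c).mpr hcd
  simp only [pvTryCand, hb, Bool.and_true, decide_eq_true_eq]
  split_ifs with h <;> omega

-- invariant of B's divisor-enumeration loop: it ends at the gcd G
theorem pvDivLoop_eq_gcd (v : List Int) (m G : Nat) (hG1 : 1 ≤ G)
    (hGcd : ∀ x ∈ v, ((G : Nat) : Int) ∣ x) (hGm : G ∣ m)
    (hmax : ∀ c : Nat, (∀ x ∈ v, ((c : Nat) : Int) ∣ x) → c ∣ G) :
    ∀ d best, 1 ≤ d → best ≤ G →
      (∀ c : Nat, c ∣ m → (∀ x ∈ v, ((c : Nat) : Int) ∣ x) → min c (m / c) < d → c ≤ best) →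
      pvDivLoop v m d best = G := by
  intro d best
  induction d, best using pvDivLoop.induct v m with
  | case1 d best h ih =>
      intro hd hbG hinv
      rw [pvDivLoop, dif_pos h]
      refine ih (by omega) ?_ ?_
      · -- the new best stays ≤ G
        by_cases hA : (m % d == 0) = true
        · rw [dif_pos hA]
          exact pvTryCand_le v _ d G (pvTryCand_le v best (m / d) G hbG hG1 hmax) hG1 hmax
        · rw [dif_neg hA]; exact hbG
      · -- the invariant at d + 1
        intro c hcm hcd hmin
        by_cases hlt : min c (m / c) < d
        · refine le_trans (hinv c hcm hcd hlt) ?_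
          by_cases hA : (m % d == 0) = true
          · rw [dif_pos hA]
            exact le_trans (pvTryCand_mono v best (m / d)) (pvTryCand_mono v _ d)
          · rw [dif_neg hA]
        · have heq : min c (m / c) = d := by omega
          have hc0 : 0 < c := by omega
          obtain ⟨k, hk⟩ := hcm
          have hk' : m / c = k := by rw [hk]; exact Nat.mul_div_cancel_left k hc0
          rcases Nat.le_total c k with hle | hge
          · -- min = c, so c = d was a candidate
            have hcd' : c = d := by omega
            have hA : (m % d == 0) = true := by
              have hz : m % d = 0 := by rw [← hcd', hk]; exact Nat.mul_mod_right c k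
              simp [hz]
            rw [dif_pos hA]
            exact hcd' ▸ pvTryCand_hit v _ c hcd
          · -- min = m / c = k = d, so c = m / d was a candidate
            have hkd : k = d := by omega
            have hA : (m % d == 0) = true := by
              have hz : m % d = 0 := by rw [← hkd, hk]; exact Nat.mul_mod_left c k
              simp [hz]
            have hmd : m / d = c := by
              rw [← hkd, hk]; exact Nat.mul_div_cancel c (by omega)
            rw [dif_pos hA]
            refine le_trans ?_ (pvTryCand_mono v _ d)
            rw [hmd]
            exact pvTryCand_hit v best c hcd
  | case2 d best h =>
      intro hd hbG hinv
      rw [pvDivLoop, dif_neg h]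
      have hmGm : G * (m / G) = m := Nat.mul_div_cancel' hGm
      have hminG : min G (m / G) < d := by
        by_contra hc
        push_neg at hc
        have h1 : d ≤ G := le_trans hc (min_le_left _ _)
        have h2 : d ≤ m / G := le_trans hc (min_le_right _ _)
        have h3 : d * d ≤ G * (m / G) := Nat.mul_le_mul h1 h2
        rw [hmGm] at h3
        omega
      have := hinv G hGm hGcd hminG
      omega

theorem pvNormalize_eq (v : List Int) :
    normalize_int_vec_py v = normalize_int_vec_py_alt v := by
  unfold normalize_int_vec_py normalize_int_vec_py_alt gcd_list_py
  have hg : v.foldl (fun g x => ((Int.gcd g x : Nat) : Int)) 0 = ((pvGn v 0 : Nat) : Int) := by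
    simpa using pvGn_int v 0
  by_cases hall : ∀ x ∈ v, x = 0
  · -- all zero: both return v
    have ha : pvFirstNonzero v = 0 := (pvFirstNonzero_eq_zero v).mpr hall
    have hA : (v.all (fun x => x == 0)) = true := by
      simp only [List.all_eq_true]; intro x hx; simpa using hall x hx
    simp [hA, ha]
  · -- some nonzero
    have hA : ¬ (v.all (fun x => x == 0)) = true := by
      intro hc; exact hall fun x hx => by simpa using List.all_eq_true.mp hc x hx
    set a : Int := pvFirstNonzero v with hadef
    have ha : a ≠ 0 := fun hc => hall ((pvFirstNonzero_eq_zero v).mp hc)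
    have haB : ¬ (a == 0) = true := by simpa using ha
    have hamem : a ∈ v := pvFirstNonzero_mem v ha
    have hgn : pvGn v 0 ≠ 0 := fun hc => hall ((pvGn_eq_zero v 0).mp hc).2
    set Gn : Nat := pvGn v 0 with hGndef
    have hG1 : 1 ≤ Gn := Nat.pos_of_ne_zero hgn
    have hGpos : 0 < ((Gn : Nat) : Int) := by exact_mod_cast hG1
    have hdvd : ∀ x ∈ v, ((Gn : Nat) : Int) ∣ x := by
      intro x hx
      have := pvGn_dvd_mem v 0 x hx
      rw [← Int.natAbs_dvd_natAbs]
      simp only [Int.natAbs_natCast]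
      exact this
    -- B's loop computes Gn
    have hbest : pvDivLoop v a.natAbs 1 1 = Gn := by
      have hm0 : 0 < a.natAbs := Int.natAbs_pos.mpr ha
      refine pvDivLoop_eq_gcd v a.natAbs Gn hG1 hdvd (pvGn_dvd_mem v 0 a hamem)
        (fun c hc => pvGn_dvd_of v 0 c (dvd_zero c)
          (fun x hx => Int.natCast_dvd_natCast.mp (Int.dvd_natAbs.mpr (hc x hx))))
        1 1 le_rfl hG1 ?_
      intro c hcm hcd hmin
      rcases Nat.eq_zero_or_pos c with h0 | h0
      · omega
      · have : 0 < a.natAbs / c := Nat.div_pos (Nat.le_of_dvd hm0 hcm) h0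
        omega
    have hprops : ∀ x ∈ v, (PySem.Int.floordiv x ((Gn : Nat) : Int) = 0 ↔ x = 0)
        ∧ (PySem.Int.floordiv x ((Gn : Nat) : Int) < 0 ↔ x < 0) := by
      intro x hx
      have h := pvFdiv_props _ x hGpos (hdvd x hx)
      exact ⟨h.1, h.2.1⟩
    -- A's divided vector equals map (· // Gn) even when Gn = 1
    have hv1 : (if ((Gn : Nat) : Int) > 1 then v.map (fun x => PySem.Int.floordiv x ((Gn : Nat) : Int)) else v)
        = v.map (fun x => PySem.Int.floordiv x ((Gn : Nat) : Int)) := by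
      by_cases hG1' : ((Gn : Nat) : Int) > 1
      · simp [hG1']
      · have hGeq : ((Gn : Nat) : Int) = 1 := by omega
        have hmap : v.map (fun x => PySem.Int.floordiv x ((Gn : Nat) : Int)) = v.map id := by
          apply List.map_congr_left
          intro x hx
          have h := (pvFdiv_props _ x hGpos (hdvd x hx)).2.2
          rw [hGeq] at h ⊢
          simpa using h
        simp [hG1', hmap]
    have hsignmap : pvFirstSign (v.map (fun x => PySem.Int.floordiv x ((Gn : Nat) : Int))) = pvFirstSign v :=
      pvFirstSign_map v _ hprops
    have hsign : pvFirstSign v = if a < 0 then -1 else 1 :=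
      pvFirstSign_of_firstNonzero v ha
    simp only [hA, hg, hv1, pvFixSign_eq, hsignmap, haB, hbest]
    by_cases hneg : a < 0
    · have hpos' : ¬ a > 0 := by omega
      rw [hsign]
      simp [hneg, hpos', List.map_map, Function.comp_def]
    · have hpos' : a > 0 := by omega
      rw [hsign]
      simp [hneg, hpos']

-- ===== VERDICT (by name: the statement is the Claim_ definition above) =====
theorem normalize_int_vec_py_spec : Claim_equal_normalize_int_vec_py := by
  intro v hdom
  unfold Spec_normalize_int_vec_py
  exact pvNormalize_eq v
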